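-- pv_equiv track=rewrite | github.com/onirudda-islam/stats | scripts/aggregate_languages.py | detect_from_rules
-- ===== SOURCE A (Python) =====
-- def detect_from_rules(rules, file_paths, file_cache):
--     """
--     file_paths   — set of all paths in the repo
--     file_cache   — dict of {path: content} for already-fetched files
--     Returns set of detected display names.
--     """
--     detected = set()
--     paths_lower = {p.lower() for p in file_paths}
--
--     for (name, colour, category, file_signals, content_signals) in rules:
--         # Check filename signals
--         for sig in file_signals:
--             sig_l = sig.lower().rstrip("/")
--             # Match exact file OR directory prefix
--             if any(p == sig_l or p.startswith(sig_l + "/") for p in paths_lower):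
--                 detected.add(name)
--                 break
--         if name in detected:
--             continue
--         # Check content signals
--         for (target_file, substring) in content_signals:
--             tf_l = target_file.lower()
--             # Find matching files
--             matches = [p for p in file_paths if p.lower() == tf_l
--                        or p.lower().endswith("/" + tf_l)]
--             for match in matches:
--                 if match not in file_cache:
--                     continue  # will be populated below
--                 if substring.lower() in file_cache[match].lower():
--                     detected.add(name)
--                     break
--             if name in detected:
--                 break
--
--     return detected
-- ===== SOURCE B (Python) =====
-- def detect_from_rules(rules, file_paths, file_cache):
--     """
--     Same result as A, but the per-rule scans over all paths are replaced by
--     O(1) lookups in three indexes built once: the set of lowered paths, the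
--     set of their slash-terminated ancestor prefixes (for filename signals),
--     and a dict mapping every after-a-slash suffix of a lowered path to the
--     original paths it belongs to (for content signals).
--     """
--     paths_lower = set()
--     dir_prefixes = set()
--     by_suffix = {}
--     for p in file_paths:
--         pl = p.lower()
--         paths_lower.add(pl)
--         by_suffix.setdefault(pl, []).append(p)
--         for i, c in enumerate(pl):
--             if c == "/":
--                 dir_prefixes.add(pl[:i])
--                 by_suffix.setdefault(pl[i + 1:], []).append(p)
--
--     def file_hit(sig):
--         s = sig.lower().rstrip("/")
--         return s in paths_lower or s in dir_prefixes
--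
--     def content_hit(target_file, substring):
--         tf_l = target_file.lower()
--         sub_l = substring.lower()
--         return any(p in file_cache and sub_l in file_cache[p].lower()
--                    for p in by_suffix.get(tf_l, ()))
--
--     detected = set()
--     for (name, _colour, _category, file_signals, content_signals) in rules:
--         if any(file_hit(s) for s in file_signals) or \
--            any(content_hit(t, s) for (t, s) in content_signals):
--             detected.add(name)
--     return detected
-- ===== Notes on version B (the rewrite author's own statement) =====
-- stated objective: faster
-- what changed: B builds three one-pass indexes over the repo paths (the set of lowered paths, the set of their slash-terminated ancestor prefixes, and a dict from every after-a-slash suffix of a lowered path to its paths) and answers each rule signal by O(1) set/dict lookups, replacing A's scan over all paths per signal.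
import Mathlib
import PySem

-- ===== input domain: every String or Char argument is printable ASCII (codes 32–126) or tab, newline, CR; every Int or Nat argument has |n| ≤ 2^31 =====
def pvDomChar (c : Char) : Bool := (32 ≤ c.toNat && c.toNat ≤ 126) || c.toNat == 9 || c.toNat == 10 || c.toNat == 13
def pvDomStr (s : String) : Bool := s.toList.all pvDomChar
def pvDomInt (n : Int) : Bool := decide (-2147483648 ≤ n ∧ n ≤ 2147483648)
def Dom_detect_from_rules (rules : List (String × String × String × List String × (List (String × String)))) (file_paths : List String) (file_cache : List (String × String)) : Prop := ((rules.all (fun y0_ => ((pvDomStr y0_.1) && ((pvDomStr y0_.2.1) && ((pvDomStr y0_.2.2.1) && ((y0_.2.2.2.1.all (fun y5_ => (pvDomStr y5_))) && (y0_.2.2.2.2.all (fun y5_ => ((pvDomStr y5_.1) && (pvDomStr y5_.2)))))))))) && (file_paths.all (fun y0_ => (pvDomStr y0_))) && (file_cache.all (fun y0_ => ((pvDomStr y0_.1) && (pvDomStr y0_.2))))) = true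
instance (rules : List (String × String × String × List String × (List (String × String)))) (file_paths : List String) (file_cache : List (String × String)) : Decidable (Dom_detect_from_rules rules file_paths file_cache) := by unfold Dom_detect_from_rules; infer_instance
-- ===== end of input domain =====

-- B replaces A's per-signal scans over all paths by O(1) lookups in indexes (path set, ancestor-prefix set, suffix->paths dict) built once.



-- ===== PORT A =====
-- exact port of Python's s.rstrip("/") (drop trailing '/' characters); used by both ports
def pvRstripSlash (cs : List Char) : List Char := (cs.reverse.dropWhile (fun c => c == '/')).reverse

-- A: inner 'for sig in file_signals' loop (breaks after the first match)
def pvAFileLoop (name : String) (paths_lower : PySem.Set (List Char)) (detected : PySem.Set String) : List String → PySem.Set String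
  | [] => detected
  | sig :: rest =>
    let sig_l := pvRstripSlash (PySem.Chars.lower sig.toList)
    if paths_lower.any (fun p => p == sig_l || PySem.Chars.startswith p (sig_l ++ ['/'])) then
      PySem.Set.add detected name
    else pvAFileLoop name paths_lower detected rest

-- A: inner 'for match in matches' loop
def pvAMatchLoop (name : String) (cache : PySem.Dict String String) (substring : String) (detected : PySem.Set String) : List String → PySem.Set String
  | [] => detected
  | m :: rest =>
    match cache.get? m with
    | none => pvAMatchLoop name cache substring detected rest
    | some content =>
      if PySem.Chars.isIn (PySem.Chars.lower substring.toList) (PySem.Chars.lower content.toList) then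
        PySem.Set.add detected name
      else pvAMatchLoop name cache substring detected rest

-- A: 'for (target_file, substring) in content_signals' loop (breaks once name is detected)
def pvAContentLoop (name : String) (file_paths : List String) (cache : PySem.Dict String String) (detected : PySem.Set String) : List (String × String) → PySem.Set String
  | [] => detected
  | (target_file, substring) :: rest =>
    let tf_l := PySem.Chars.lower target_file.toList
    let matchesL := file_paths.filter (fun p =>
      PySem.Chars.lower p.toList == tf_l || PySem.Chars.endswith (PySem.Chars.lower p.toList) ('/' :: tf_l))
    let d' := pvAMatchLoop name cache substring detected matchesL
    if name ∈ d' then d' else pvAContentLoop name file_paths cache d' rest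

def detect_from_rules (rules : List (String × String × String × List String × (List (String × String)))) (file_paths : List String) (file_cache : List (String × String)) : List String :=
  let paths_lower : PySem.Set (List Char) :=
    PySem.Set.ofList (file_paths.map (fun p => PySem.Chars.lower p.toList))
  rules.foldl (fun detected r =>
    let name := r.1
    let d1 := pvAFileLoop name paths_lower detected r.2.2.2.1
    if name ∈ d1 then d1
    else pvAContentLoop name file_paths (PySem.Dict.mk file_cache) d1 r.2.2.2.2)
    PySem.Set.empty

-- ===== PORT B =====
-- keys of the ancestor-prefix index: pl[:i] for each slash position i
def pvPrefKeys (pl : List Char) : List (List Char) :=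
  ((PySem.List.enumerate pl).filter (fun ic => ic.2 == '/')).map
    (fun ic => PySem.Chars.slice pl none (some ic.1))

-- keys of the after-a-slash suffix index: pl itself and pl[i+1:] for each slash position i
def pvSufKeys (pl : List Char) : List (List Char) :=
  pl :: ((PySem.List.enumerate pl).filter (fun ic => ic.2 == '/')).map
    (fun ic => PySem.Chars.slice pl (some (ic.1 + 1)) none)

def detect_from_rules_alt (rules : List (String × String × String × List String × (List (String × String)))) (file_paths : List String) (file_cache : List (String × String)) : List String :=
  let paths_lower : PySem.Set (List Char) :=
    PySem.Set.ofList (file_paths.map (fun p => PySem.Chars.lower p.toList))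
  let dir_prefixes : PySem.Set (List Char) :=
    PySem.Set.ofList (file_paths.flatMap (fun p => pvPrefKeys (PySem.Chars.lower p.toList)))
  let by_suffix : PySem.Dict (List Char) (List String) :=
    (file_paths.flatMap (fun p => (pvSufKeys (PySem.Chars.lower p.toList)).map (fun k => (k, p)))).foldl
      (fun d q => d.modify q.1 [] (fun v => v ++ [q.2])) PySem.Dict.empty
  let cache := PySem.Dict.mk file_cache
  rules.foldl (fun detected r =>
    let fileHit := fun (sig : String) =>
      let s := pvRstripSlash (PySem.Chars.lower sig.toList)
      paths_lower.contains s || dir_prefixes.contains s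
    let contentHit := fun (q : String × String) =>
      let sub_l := PySem.Chars.lower q.2.toList
      (by_suffix.getD (PySem.Chars.lower q.1.toList) []).any (fun p =>
        match cache.get? p with
        | none => false
        | some content => PySem.Chars.isIn sub_l (PySem.Chars.lower content.toList))
    if r.2.2.2.1.any fileHit || r.2.2.2.2.any contentHit then PySem.Set.add detected r.1 else detected)
    PySem.Set.empty

-- ===== PRECONDITION & SPEC =====
def Spec_detect_from_rules (rules : List (String × String × String × List String × (List (String × String)))) (file_paths : List String) (file_cache : List (String × String)) (out : List String) : Prop := out = detect_from_rules_alt rules file_paths file_cache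
instance (rules : List (String × String × String × List String × (List (String × String)))) (file_paths : List String) (file_cache : List (String × String)) (out : List String) : Decidable (Spec_detect_from_rules rules file_paths file_cache out) := by unfold Spec_detect_from_rules; infer_instance

-- ===== CLAIM (what is proved, stated in full; the proofs are below) =====
def Claim_equal_detect_from_rules : Prop := ∀ (rules : List (String × String × String × List String × (List (String × String)))) (file_paths : List String) (file_cache : List (String × String)), Dom_detect_from_rules rules file_paths file_cache → Spec_detect_from_rules rules file_paths file_cache (detect_from_rules rules file_paths file_cache)


-- ===== LEMMAS AND PROOFS =====

-- the content test A and B both apply to a candidate path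
def pvC (cache : PySem.Dict String String) (sub : String) (p : String) : Bool :=
  match cache.get? p with
  | none => false
  | some content => PySem.Chars.isIn (PySem.Chars.lower sub.toList) (PySem.Chars.lower content.toList)

theorem pvAFileLoop_eq (name : String) (PL : PySem.Set (List Char)) (d : PySem.Set String) (sigs : List String) :
    pvAFileLoop name PL d sigs =
      if sigs.any (fun sig => PL.any (fun p => p == pvRstripSlash (PySem.Chars.lower sig.toList) ||
          PySem.Chars.startswith p (pvRstripSlash (PySem.Chars.lower sig.toList) ++ ['/']))) then
        PySem.Set.add d name else d := by
  induction sigs with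
  | nil => simp [pvAFileLoop]
  | cons sig rest ih =>
    simp only [pvAFileLoop, List.any_cons, ih]
    by_cases h : PL.any (fun p => p == pvRstripSlash (PySem.Chars.lower sig.toList) ||
        PySem.Chars.startswith p (pvRstripSlash (PySem.Chars.lower sig.toList) ++ ['/'])) = true <;>
      simp [h]

theorem pvAMatchLoop_eq (name : String) (cache : PySem.Dict String String) (sub : String) (d : PySem.Set String) (ms : List String) :
    pvAMatchLoop name cache sub d ms = if ms.any (pvC cache sub) then PySem.Set.add d name else d := by
  induction ms with
  | nil => simp [pvAMatchLoop]
  | cons m rest ih =>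
    simp only [pvAMatchLoop, List.any_cons]
    rcases hg : cache.get? m with _ | content
    · simp [ih, pvC, hg]
    · by_cases hin : PySem.Chars.isIn (PySem.Chars.lower sub.toList) (PySem.Chars.lower content.toList) = true <;>
        simp [ih, pvC, hg, hin]

theorem pvAContentLoop_eq (name : String) (fp : List String) (cache : PySem.Dict String String) (d : PySem.Set String) (cs : List (String × String)) :
    pvAContentLoop name fp cache d cs =
      if name ∈ d then d
      else if cs.any (fun q => (fp.filter (fun p =>
              PySem.Chars.lower p.toList == PySem.Chars.lower q.1.toList ||
              PySem.Chars.endswith (PySem.Chars.lower p.toList) ('/' :: PySem.Chars.lower q.1.toList))).any (pvC cache q.2)) then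
        PySem.Set.add d name else d := by
  induction cs generalizing d with
  | nil => simp [pvAContentLoop]
  | cons q rest ih =>
    obtain ⟨tf, sub⟩ := q
    simp only [pvAContentLoop, List.any_cons, pvAMatchLoop_eq]
    by_cases hq : (fp.filter (fun p =>
        PySem.Chars.lower p.toList == PySem.Chars.lower tf.toList ||
        PySem.Chars.endswith (PySem.Chars.lower p.toList) ('/' :: PySem.Chars.lower tf.toList))).any (pvC cache sub) = true
    · -- this signal fires: d' = add d name, name ∈ d', break
      simp only [hq, if_pos]
      have hmem : name ∈ PySem.Set.add d name := by
        rw [PySem.Set.mem_add]; exact Or.inr rfl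
      by_cases hd : name ∈ d
      · rw [PySem.Set.add_of_mem hd]
        simp [hd]
      · simp [hd]
    · rw [if_neg hq]
      have hq' := eq_false_of_ne_true hq
      by_cases hd : name ∈ d <;> rw [ih] <;> simp only [hq', Bool.false_or] <;> simp [hd]

theorem pvPrefKeys_mem (pl s : List Char) : s ∈ pvPrefKeys pl ↔ (s ++ ['/']) <+: pl := by
  unfold pvPrefKeys
  simp only [List.mem_map, List.mem_filter, PySem.List.mem_enumerate_iff]
  constructor
  · rintro ⟨⟨i, c⟩, ⟨⟨k, hk, hik⟩, hc⟩, hs⟩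
    rw [Prod.mk.injEq] at hik
    obtain ⟨hi, hcc⟩ := hik
    rw [zero_add] at hi
    subst hi; subst hs; subst hcc
    have hsl : PySem.Chars.slice pl none (some (k : Int)) = pl.take k := by
      simp [PySem.List.slice_to pl (b := (k : Int)) (Int.natCast_nonneg _)]
    rw [hsl]
    refine ⟨pl.drop (k+1), ?_⟩
    have hc' : pl[k] = '/' := by simpa using hc
    calc pl.take k ++ ['/'] ++ pl.drop (k+1)
        = pl.take k ++ ('/' :: pl.drop (k+1)) := by simp
      _ = pl.take k ++ (pl[k] :: pl.drop (k+1)) := by rw [hc']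
      _ = pl.take k ++ pl.drop k := by rw [← List.drop_eq_getElem_cons hk]
      _ = pl := List.take_append_drop k pl
  · rintro ⟨t, ht⟩
    have hlen : s.length < pl.length := by
      have := congrArg List.length ht; simp at this; omega
    refine ⟨((s.length : Int), '/'), ⟨⟨s.length, hlen, ?_⟩, by simp⟩, ?_⟩
    · have : pl[s.length] = '/' := by
        subst ht
        rw [List.getElem_append_left (by simp)]
        rw [List.getElem_append_right (by simp)]
        simp
      simp [this]
    · have hsl : PySem.Chars.slice pl none (some (s.length : Int)) = pl.take s.length := by
        simp [PySem.List.slice_to pl (b := (s.length : Int)) (Int.natCast_nonneg _)]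
      rw [hsl, ← ht]
      rw [List.append_assoc]
      rw [List.take_left]

theorem pvSufKeys_mem (pl s : List Char) : s ∈ pvSufKeys pl ↔ (pl = s ∨ ('/' :: s) <:+ pl) := by
  unfold pvSufKeys
  simp only [List.mem_cons, List.mem_map, List.mem_filter, PySem.List.mem_enumerate_iff]
  constructor
  · rintro (hs | ⟨⟨i, c⟩, ⟨⟨k, hk, hik⟩, hc⟩, hs⟩)
    · exact Or.inl hs.symm
    · rw [Prod.mk.injEq] at hik
      obtain ⟨hi, hcc⟩ := hik
      rw [zero_add] at hi
      subst hi; subst hs; subst hcc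
      have hc' : pl[k] = '/' := by simpa using hc
      have hsl : PySem.Chars.slice pl (some ((k : Int) + 1)) none = pl.drop (k+1) := by
        have := PySem.List.slice_from (a := (k : Int) + 1) pl (by omega)
        simpa using this
      rw [hsl]
      refine Or.inr ⟨pl.take k, ?_⟩
      calc pl.take k ++ '/' :: pl.drop (k+1)
          = pl.take k ++ (pl[k] :: pl.drop (k+1)) := by rw [hc']
        _ = pl.take k ++ pl.drop k := by rw [← List.drop_eq_getElem_cons hk]
        _ = pl := List.take_append_drop k pl
  · rintro (hs | ⟨A, hA⟩)
    · exact Or.inl hs.symm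
    · have hlen : A.length < pl.length := by
        have := congrArg List.length hA; simp at this; omega
      refine Or.inr ⟨((A.length : Int), '/'), ⟨⟨A.length, hlen, ?_⟩, by simp⟩, ?_⟩
      · have : pl[A.length] = '/' := by
          subst hA
          rw [List.getElem_append_right (by simp)]
          simp
        simp [this]
      · have hsl : PySem.Chars.slice pl (some ((A.length : Int) + 1)) none = pl.drop (A.length+1) := by
          have := PySem.List.slice_from (a := (A.length : Int) + 1) pl (by omega)
          simpa using this
        rw [hsl, ← hA]
        rw [show A ++ '/' :: s = (A ++ ['/']) ++ s by simp]
        rw [List.drop_left' (by simp)]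

theorem pvFileSig_eq (fp : List String) (s : List Char) :
    (PySem.Set.ofList (fp.map (fun p => PySem.Chars.lower p.toList))).any
        (fun p => p == s || PySem.Chars.startswith p (s ++ ['/'])) =
      ((PySem.Set.ofList (fp.map (fun p => PySem.Chars.lower p.toList))).contains s ||
       (PySem.Set.ofList (fp.flatMap (fun p => pvPrefKeys (PySem.Chars.lower p.toList)))).contains s) := by
  rw [Bool.eq_iff_iff]
  simp [PySem.Set.mem_ofList, PySem.Chars.startswith_iff, pvPrefKeys_mem]
  constructor
  · rintro ⟨p, hp, (h | h)⟩
    · exact Or.inl ⟨p, hp, h⟩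
    · exact Or.inr ⟨p, hp, h⟩
  · rintro (⟨p, hp, h⟩ | ⟨p, hp, h⟩)
    · exact ⟨p, hp, Or.inl h⟩
    · exact ⟨p, hp, Or.inr h⟩

theorem pvBucket_mem (fp : List String) (k : List Char) (p : String) :
    p ∈ ((fp.flatMap (fun p => (pvSufKeys (PySem.Chars.lower p.toList)).map (fun k => (k, p)))).foldl
          (fun d q => d.modify q.1 [] (fun v => v ++ [q.2])) PySem.Dict.empty).getD k [] ↔
      p ∈ fp ∧ k ∈ pvSufKeys (PySem.Chars.lower p.toList) := by
  rw [PySem.Dict.getD_foldl_modify_append]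
  simp only [List.mem_append, List.mem_map, List.mem_filter, List.mem_flatMap]
  constructor
  · rintro (h | hr)
    · rw [show (PySem.Dict.empty : PySem.Dict (List Char) (List String)).getD k [] = [] from rfl] at h
      cases h
    · obtain ⟨q, ⟨⟨p'', hp'', hmem⟩, hbeq⟩, rfl⟩ := hr
      obtain ⟨k3, hk3, hpair⟩ := hmem
      subst hpair
      have hkk : k3 = k := by simpa using hbeq
      subst hkk
      exact ⟨hp'', hk3⟩
  · rintro ⟨hp, hk⟩
    exact Or.inr ⟨(k, p), ⟨⟨p, hp, ⟨k, hk, rfl⟩⟩, by simp⟩, rfl⟩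

theorem pvContentSig_eq (fp : List String) (cache : PySem.Dict String String) (tf sub : String) :
    (fp.filter (fun p =>
        PySem.Chars.lower p.toList == PySem.Chars.lower tf.toList ||
        PySem.Chars.endswith (PySem.Chars.lower p.toList) ('/' :: PySem.Chars.lower tf.toList))).any (pvC cache sub) =
      (((fp.flatMap (fun p => (pvSufKeys (PySem.Chars.lower p.toList)).map (fun k => (k, p)))).foldl
          (fun d q => d.modify q.1 [] (fun v => v ++ [q.2])) PySem.Dict.empty).getD (PySem.Chars.lower tf.toList) []).any (pvC cache sub) := by
  rw [Bool.eq_iff_iff]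
  simp only [List.any_eq_true, List.mem_filter, pvBucket_mem, Bool.or_eq_true, beq_iff_eq,
    PySem.Chars.endswith_iff, pvSufKeys_mem]

-- ===== VERDICT (by name: the statement is the Claim_ definition above) =====

theorem detect_from_rules_spec : Claim_equal_detect_from_rules := by
  intro rules fp fc _
  show detect_from_rules rules fp fc = detect_from_rules_alt rules fp fc
  unfold detect_from_rules detect_from_rules_alt
  apply List.foldl_ext
  intro d r _
  dsimp only
  rw [pvAFileLoop_eq, pvAContentLoop_eq]
  have hfile : (r.2.2.2.1.any fun sig =>
      (PySem.Set.ofList (fp.map (fun p => PySem.Chars.lower p.toList))).contains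
          (pvRstripSlash (PySem.Chars.lower sig.toList)) ||
        (PySem.Set.ofList (fp.flatMap (fun p => pvPrefKeys (PySem.Chars.lower p.toList)))).contains
          (pvRstripSlash (PySem.Chars.lower sig.toList)))
      = (r.2.2.2.1.any fun sig =>
      (PySem.Set.ofList (fp.map (fun p => PySem.Chars.lower p.toList))).any
        (fun p => p == pvRstripSlash (PySem.Chars.lower sig.toList) ||
          PySem.Chars.startswith p (pvRstripSlash (PySem.Chars.lower sig.toList) ++ ['/']))) := by
    exact List.any_congr rfl (fun sig => (pvFileSig_eq fp _).symm)
  have hcont : (r.2.2.2.2.any fun q =>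
      (((fp.flatMap (fun p => (pvSufKeys (PySem.Chars.lower p.toList)).map (fun k => (k, p)))).foldl
          (fun d q => d.modify q.1 [] (fun v => v ++ [q.2])) PySem.Dict.empty).getD
            (PySem.Chars.lower q.1.toList) []).any (pvC (PySem.Dict.mk fc) q.2))
      = (r.2.2.2.2.any fun q => (fp.filter (fun p =>
          PySem.Chars.lower p.toList == PySem.Chars.lower q.1.toList ||
          PySem.Chars.endswith (PySem.Chars.lower p.toList) ('/' :: PySem.Chars.lower q.1.toList))).any
            (pvC (PySem.Dict.mk fc) q.2)) := by
    exact List.any_congr rfl (fun q => (pvContentSig_eq fp _ q.1 q.2).symm)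
  show _ = (if _ || _ then _ else _)
  rw [show (fun (q : String × String) =>
        (((fp.flatMap (fun p => (pvSufKeys (PySem.Chars.lower p.toList)).map (fun k => (k, p)))).foldl
            (fun d q => d.modify q.1 [] (fun v => v ++ [q.2])) PySem.Dict.empty).getD
              (PySem.Chars.lower q.1.toList) []).any (fun p =>
          match (PySem.Dict.mk fc).get? p with
          | none => false
          | some content => PySem.Chars.isIn (PySem.Chars.lower q.2.toList) (PySem.Chars.lower content.toList)))
      = (fun (q : String × String) =>
        (((fp.flatMap (fun p => (pvSufKeys (PySem.Chars.lower p.toList)).map (fun k => (k, p)))).foldl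
            (fun d q => d.modify q.1 [] (fun v => v ++ [q.2])) PySem.Dict.empty).getD
              (PySem.Chars.lower q.1.toList) []).any (pvC (PySem.Dict.mk fc) q.2)) from rfl]
  rw [hfile, hcont]
  by_cases hf : (r.2.2.2.1.any fun sig =>
      (PySem.Set.ofList (fp.map (fun p => PySem.Chars.lower p.toList))).any
        (fun p => p == pvRstripSlash (PySem.Chars.lower sig.toList) ||
          PySem.Chars.startswith p (pvRstripSlash (PySem.Chars.lower sig.toList) ++ ['/']))) = true
  · rw [hf]
    have hmem : r.1 ∈ PySem.Set.add d r.1 := by rw [PySem.Set.mem_add]; exact Or.inr rfl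
    simp [hmem]
  · rw [eq_false_of_ne_true hf]
    simp only [Bool.false_or]
    by_cases hd : r.1 ∈ d
    · simp [hd]
    · simp [hd]
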